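-- pv_equiv track=rewrite | github.com/Chandru03/re-pack | multipack_poc/core/solver_box_to_pallet.py | _generate_axis_positions_2d
-- ===== SOURCE A (Python) =====
-- from typing import Dict, List, Tuple
--
-- def _generate_axis_positions_2d(max_length: int, sizes: List[int]) -> List[int]:
--     """
--     Compute all reachable coordinate starts by combining item sizes up to the container limit.
--     This allows boxes to be placed at any position that can be reached by multiples of box dimensions,
--     enabling more flexible and efficient packing.
--     """
--     sizes = [size for size in sizes if size > 0]
--     if not sizes:
--         return [0]
--
--     reachable = {0}
--     queue = [0]
--     while queue:
--         current = queue.pop()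
--         for size in sizes:
--             new_value = current + size
--             if new_value <= max_length and new_value not in reachable:
--                 reachable.add(new_value)
--                 queue.append(new_value)
--
--     return sorted(reachable)
-- ===== SOURCE B (Python) =====
-- def _generate_axis_positions_2d(max_length, sizes):
--     """Forward DP over a boolean reachability table instead of BFS with a set+queue."""
--     sizes = [size for size in sizes if size > 0]
--     if not sizes:
--         return [0]
--     if max_length < 0:
--         return [0]
--     reach = [False] * (max_length + 1)
--     reach[0] = True
--     for i in range(max_length + 1):
--         if reach[i]:
--             for size in sizes:
--                 if i + size <= max_length:
--                     reach[i + size] = True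
--     return [i for i in range(max_length + 1) if reach[i]]
-- ===== Notes on version B (the rewrite author's own statement) =====
-- stated objective: alternative
-- what changed: Replaces the BFS over a hash set and explicit queue (plus a final sort) by a forward dynamic-programming pass over a boolean table of length max_length+1, whose kept indices are ascending by construction so no sort is needed.
import Mathlib
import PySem

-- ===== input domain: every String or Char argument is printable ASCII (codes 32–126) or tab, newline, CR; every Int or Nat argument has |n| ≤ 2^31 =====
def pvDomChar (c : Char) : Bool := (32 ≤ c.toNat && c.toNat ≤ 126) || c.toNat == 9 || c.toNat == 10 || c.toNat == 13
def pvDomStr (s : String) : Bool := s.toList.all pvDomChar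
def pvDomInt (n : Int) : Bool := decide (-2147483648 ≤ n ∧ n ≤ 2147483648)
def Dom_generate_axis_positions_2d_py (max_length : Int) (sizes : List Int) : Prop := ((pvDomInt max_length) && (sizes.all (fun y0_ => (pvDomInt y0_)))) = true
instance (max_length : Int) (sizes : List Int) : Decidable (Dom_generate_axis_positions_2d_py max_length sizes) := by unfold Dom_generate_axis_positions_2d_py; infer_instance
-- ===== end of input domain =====

-- B replaces A's BFS over a hash set and queue (plus a final sort) by a forward DP over a
-- boolean reachability table whose kept indices are ascending by construction.

-- ===== PORT A =====
-- one step of A's inner 'for size in sizes' loop over the state (reachable, queue)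
def pvStepA (max_length curr : Int) (st : PySem.Set Int × List Int) (size : Int) :
    PySem.Set Int × List Int :=
  let nv := curr + size
  if nv ≤ max_length ∧ nv ∉ st.1 then (PySem.Set.add st.1 nv, st.2 ++ [nv]) else st

-- A's 'while queue:' loop; the fuel argument only totalises it and is proven sufficient below
def pvLoopA (max_length : Int) (sizes : List Int) :
    Nat → PySem.Set Int → List Int → PySem.Set Int
  | 0, reachable, _ => reachable
  | fuel + 1, reachable, queue =>
    match PySem.List.pop? queue (-1) with
    | none => reachable
    | some (curr, queue') =>
      let st := sizes.foldl (pvStepA max_length curr) (reachable, queue')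
      pvLoopA max_length sizes fuel st.1 st.2

def generate_axis_positions_2d_py (max_length : Int) (sizes : List Int) : List Int :=
  let sizes' := sizes.filter (fun size => decide (0 < size))
  if sizes' = [] then [0]
  else
    let F := pvLoopA max_length sizes' (2 * max_length.toNat + 2) (PySem.Set.ofList [0]) [0]
    PySem.List.sorted F (fun x => x) false

-- ===== PORT B =====
-- one step of B's inner 'for size in sizes' loop: reach[i+size] = True when in bounds
def pvStepUpd (max_length i : Int) (reach : List Bool) (size : Int) : List Bool :=
  if i + size ≤ max_length then PySem.List.pySetD reach (i + size) true else reach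

-- one step of B's outer 'for i in range(max_length+1)' loop
def pvStepB (max_length : Int) (sizes : List Int) (reach : List Bool) (i : Int) : List Bool :=
  if PySem.List.pyGetD reach i false then sizes.foldl (pvStepUpd max_length i) reach else reach

def generate_axis_positions_2d_py_alt (max_length : Int) (sizes : List Int) : List Int :=
  let sizes' := sizes.filter (fun size => decide (0 < size))
  if sizes' = [] then [0]
  else if max_length < 0 then [0]
  else
    let reach0 := PySem.List.pySetD (List.replicate (max_length + 1).toNat false) 0 true
    let reach := (PySem.List.pyRange 0 (max_length + 1) 1).foldl (pvStepB max_length sizes') reach0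
    (PySem.List.pyRange 0 (max_length + 1) 1).filter (fun i => PySem.List.pyGetD reach i false)

-- ===== PRECONDITION & SPEC =====
def Spec_generate_axis_positions_2d_py (max_length : Int) (sizes : List Int) (out : List Int) : Prop := out = generate_axis_positions_2d_py_alt max_length sizes
instance (max_length : Int) (sizes : List Int) (out : List Int) : Decidable (Spec_generate_axis_positions_2d_py max_length sizes out) := by unfold Spec_generate_axis_positions_2d_py; infer_instance

-- ===== CLAIM (what is proved, stated in full; the proofs are below) =====
def Claim_equal_generate_axis_positions_2d_py : Prop := ∀ (max_length : Int) (sizes : List Int), Dom_generate_axis_positions_2d_py max_length sizes → Spec_generate_axis_positions_2d_py max_length sizes (generate_axis_positions_2d_py max_length sizes)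

-- ===== LEMMAS AND PROOFS =====

-- the set both programs compute: values reachable from 0 by adding sizes, staying ≤ max
inductive pvReach (max : Int) (sizes : List Int) : Int → Prop
  | zero : pvReach max sizes 0
  | step {v s : Int} : pvReach max sizes v → s ∈ sizes → v + s ≤ max → pvReach max sizes (v + s)

theorem pvReach_bound {max : Int} {sizes : List Int} (hpos : ∀ s ∈ sizes, 0 < s)
    {v : Int} (h : pvReach max sizes v) : v = 0 ∨ (0 < v ∧ v ≤ max) := by
  induction h with
  | zero => exact Or.inl rfl
  | step hv hs hle ih =>
    right
    rcases ih with h0 | ⟨h1, _⟩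
    · subst h0; exact ⟨by simpa using hpos _ hs, hle⟩
    · exact ⟨by have := hpos _ hs; omega, hle⟩

-- a Nodup list of ints, each 0 or in (0, max], has at most max.toNat + 1 elements
theorem pvLenBound {max : Int} {r : List Int} (hnd : r.Nodup)
    (hb : ∀ v ∈ r, v = 0 ∨ (0 < v ∧ v ≤ max)) : r.length ≤ max.toNat + 1 := by
  classical
  have hmap : (r.map Int.toNat).Nodup := by
    refine List.Nodup.map_on ?_ hnd
    intro x hx y hy hxy
    rcases hb x hx with hx0 | ⟨hx1, _⟩ <;> rcases hb y hy with hy0 | ⟨hy1, _⟩ <;> omega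
  have hsub : (r.map Int.toNat).toFinset ⊆ Finset.range (max.toNat + 1) := by
    intro x hx
    simp only [List.mem_toFinset, List.mem_map] at hx
    obtain ⟨v, hv, rfl⟩ := hx
    rcases hb v hv with h0 | ⟨h1, h2⟩ <;> simp only [Finset.mem_range] <;> omega
  have hc := Finset.card_le_card hsub
  rw [List.toFinset_card_of_nodup hmap, Finset.card_range] at hc
  simpa using hc

-- the inner fold of A appends the SAME fresh list to reachable and to the queue
theorem pvFoldA (max curr : Int) (l : List Int) (r : PySem.Set Int) (q : List Int) :
    ∃ new : List Int,
      (l.foldl (pvStepA max curr) (r, q)).1 = r ++ new ∧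
      (l.foldl (pvStepA max curr) (r, q)).2 = q ++ new ∧
      (∀ v ∈ new, ∃ s ∈ l, v = curr + s ∧ v ≤ max) ∧
      (r.Nodup → (r ++ new).Nodup) ∧
      (∀ s ∈ l, curr + s ≤ max → curr + s ∈ r ++ new) := by
  induction l generalizing r q with
  | nil => exact ⟨[], by simp, by simp, by simp, by simp, by simp⟩
  | cons s0 l ih =>
    by_cases h : curr + s0 ≤ max ∧ curr + s0 ∉ r
    · have hstep : pvStepA max curr (r, q) s0 = (r ++ [curr + s0], q ++ [curr + s0]) := by
        simp [pvStepA, h, PySem.Set.add_of_not_mem h.2]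
      obtain ⟨new', h1, h2, h3, h4, h5⟩ := ih (r ++ [curr + s0]) (q ++ [curr + s0])
      refine ⟨(curr + s0) :: new', ?_, ?_, ?_, ?_, ?_⟩
      · rw [List.foldl_cons, hstep, h1]; simp
      · rw [List.foldl_cons, hstep, h2]; simp
      · intro v hv
        rcases List.mem_cons.1 hv with rfl | hv
        · exact ⟨s0, List.mem_cons_self, rfl, h.1⟩
        · obtain ⟨s, hs, hveq, hvle⟩ := h3 v hv
          exact ⟨s, List.mem_cons_of_mem _ hs, hveq, hvle⟩
      · intro hnd
        have hnd2 : (r ++ [curr + s0]).Nodup := by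
          have hcons : ((curr + s0) :: r).Nodup := List.nodup_cons.2 ⟨h.2, hnd⟩
          first
          | exact (List.perm_append_singleton _ _).nodup_iff.mpr hcons
          | exact (List.perm_append_singleton _ _).symm.nodup_iff.mpr hcons
          | exact (List.perm_append_singleton _ _).nodup_iff.mp hcons
        have := h4 hnd2
        simpa using this
      · intro s hs hle
        rcases List.mem_cons.1 hs with rfl | hs
        · exact List.mem_append_right _ List.mem_cons_self
        · have := h5 s hs hle
          simpa using this
    · have hstep : pvStepA max curr (r, q) s0 = (r, q) := by
        simp only [pvStepA]
        rw [if_neg h]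
      obtain ⟨new, h1, h2, h3, h4, h5⟩ := ih r q
      refine ⟨new, by rw [List.foldl_cons, hstep]; exact h1, by rw [List.foldl_cons, hstep]; exact h2, ?_, h4, ?_⟩
      · intro v hv
        obtain ⟨s, hs, hveq, hvle⟩ := h3 v hv
        exact ⟨s, List.mem_cons_of_mem _ hs, hveq, hvle⟩
      · intro s hs hle
        rcases List.mem_cons.1 hs with rfl | hs
        · have hmem : curr + s ∈ r := by
            by_contra hmem
            exact h ⟨hle, hmem⟩
          exact List.mem_append_left _ hmem
        · exact h5 s hs hle

theorem pvLoopA_spec (max : Int) (sizes : List Int) (hpos : ∀ s ∈ sizes, 0 < s) :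
    ∀ (fuel : Nat) (r : PySem.Set Int) (q : List Int),
      r.Nodup →
      (∀ v ∈ r, pvReach max sizes v) →
      (∀ v ∈ q, v ∈ r) →
      (∀ v ∈ r, v ∈ q ∨ ∀ s ∈ sizes, v + s ≤ max → v + s ∈ r) →
      2 * (max.toNat + 1 - r.length) + q.length < fuel →
      (∀ v ∈ r, v ∈ pvLoopA max sizes fuel r q) ∧
      (pvLoopA max sizes fuel r q).Nodup ∧
      (∀ v ∈ pvLoopA max sizes fuel r q, pvReach max sizes v) ∧
      (∀ v ∈ pvLoopA max sizes fuel r q, ∀ s ∈ sizes, v + s ≤ max → v + s ∈ pvLoopA max sizes fuel r q) := by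
  intro fuel
  induction fuel with
  | zero => intro r q _ _ _ _ hfuel; omega
  | succ fuel ih =>
    intro r q hnd hR hq hcl hfuel
    rcases q.eq_nil_or_concat with rfl | ⟨q'', curr, rfl⟩
    · have hpop : PySem.List.pop? ([] : List Int) (-1) = none := by decide
      simp only [pvLoopA, hpop]
      refine ⟨fun v hv => hv, hnd, hR, ?_⟩
      intro v hv s hs hle
      rcases hcl v hv with hvq | hvc
      · exact absurd hvq (List.not_mem_nil)
      · exact hvc s hs hle
    · simp only [List.concat_eq_append] at hq hcl hfuel ⊢
      have hpop : PySem.List.pop? (q'' ++ [curr]) (-1) = some (curr, q'') :=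
        PySem.List.pop?_last q'' curr
      obtain ⟨new, h1, h2, h3, h4, h5⟩ := pvFoldA max curr sizes r q''
      have hcurr : curr ∈ r := hq curr (by simp)
      have hnd' : (r ++ new).Nodup := h4 hnd
      have hR' : ∀ v ∈ r ++ new, pvReach max sizes v := by
        intro v hv
        rcases List.mem_append.1 hv with hv | hv
        · exact hR v hv
        · obtain ⟨s, hs, hveq, _⟩ := h3 v hv
          subst hveq
          exact pvReach.step (hR curr hcurr) hs (by
            have := h3 _ hv
            exact (h3 _ hv).choose_spec.2.2)
      have hq' : ∀ v ∈ q'' ++ new, v ∈ r ++ new := by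
        intro v hv
        rcases List.mem_append.1 hv with hv | hv
        · exact List.mem_append_left _ (hq v (List.mem_append_left _ hv))
        · exact List.mem_append_right _ hv
      have hcl' : ∀ v ∈ r ++ new, v ∈ q'' ++ new ∨ ∀ s ∈ sizes, v + s ≤ max → v + s ∈ r ++ new := by
        intro v hv
        rcases List.mem_append.1 hv with hv | hv
        · rcases hcl v hv with hvq | hvc
          · rcases List.mem_append.1 hvq with hvq | hvq
            · exact Or.inl (List.mem_append_left _ hvq)
            · right
              rw [List.mem_singleton] at hvq
              subst hvq
              exact fun s hs hle => h5 s hs hle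
          · exact Or.inr (fun s hs hle => List.mem_append_left _ (hvc s hs hle))
        · exact Or.inl (List.mem_append_right _ hv)
      have hbound : ∀ v ∈ r ++ new, v = 0 ∨ (0 < v ∧ v ≤ max) :=
        fun v hv => pvReach_bound hpos (hR' v hv)
      have hlen : (r ++ new).length ≤ max.toNat + 1 := pvLenBound hnd' hbound
      have hfuel' : 2 * (max.toNat + 1 - (r ++ new).length) + (q'' ++ new).length < fuel := by
        simp only [List.length_append, List.length_cons, List.length_nil,
          List.length_singleton] at *
        omega
      have := ih (r ++ new) (q'' ++ new) hnd' hR' hq' hcl' hfuel'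
      simp only [pvLoopA, hpop]
      rw [show (sizes.foldl (pvStepA max curr) (r, q'')).1 = r ++ new from h1,
          show (sizes.foldl (pvStepA max curr) (r, q'')).2 = q'' ++ new from h2] at *
      refine ⟨?_, this.2.1, this.2.2.1, this.2.2.2⟩
      intro v hv
      exact this.1 v (List.mem_append_left _ hv)

theorem pvReach_mem {max : Int} {sizes : List Int} {F : List Int}
    (h0 : (0 : Int) ∈ F)
    (hcl : ∀ v ∈ F, ∀ s ∈ sizes, v + s ≤ max → v + s ∈ F) :
    ∀ v, pvReach max sizes v → v ∈ F := by
  intro v h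
  induction h with
  | zero => exact h0
  | step hv hs hle ih => exact hcl _ ih _ hs hle

-- A's output is sorted(F) for an F that is Nodup with members exactly pvReach
theorem pvA_char (max : Int) (sizes : List Int) (hne : sizes.filter (fun s => decide (0 < s)) ≠ []) :
    ∃ F : List Int,
      generate_axis_positions_2d_py max sizes = PySem.List.sorted F (fun x => x) false ∧
      F.Nodup ∧ ∀ v, v ∈ F ↔ pvReach max (sizes.filter (fun s => decide (0 < s))) v := by
  set sz := sizes.filter (fun s => decide (0 < s)) with hsz
  have hpos : ∀ s ∈ sz, 0 < s := by
    intro s hs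
    rw [hsz, List.mem_filter] at hs
    exact of_decide_eq_true hs.2
  have hof : PySem.Set.ofList [(0 : Int)] = [(0 : Int)] := by decide
  refine ⟨pvLoopA max sz (2 * max.toNat + 2) (PySem.Set.ofList [0]) [0], ?_, ?_, ?_⟩
  · unfold generate_axis_positions_2d_py
    rw [if_neg hne]
  · rw [hof]
    exact (pvLoopA_spec max sz hpos (2 * max.toNat + 2) [0] [0]
      (List.nodup_singleton _)
      (by intro v hv; rw [List.mem_singleton] at hv; subst hv; exact pvReach.zero)
      (fun v hv => hv)
      (fun v hv => Or.inl hv)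
      (by simp)).2.1
  · rw [hof]
    obtain ⟨hsub, hndF, hRF, hclF⟩ := pvLoopA_spec max sz hpos (2 * max.toNat + 2) [0] [0]
      (List.nodup_singleton _)
      (by intro v hv; rw [List.mem_singleton] at hv; subst hv; exact pvReach.zero)
      (fun v hv => hv)
      (fun v hv => Or.inl hv)
      (by simp)
    intro v
    constructor
    · exact hRF v
    · exact fun h => pvReach_mem (hsub 0 (List.mem_singleton.2 rfl)) hclF v h

-- ===== B side =====

-- characterisation of the table after the outer loop has processed indices < j
def pvChar (max : Int) (sizes : List Int) (j v : Int) : Prop :=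
  v = 0 ∨ ∃ u s, 0 ≤ u ∧ u < j ∧ pvReach max sizes u ∧ s ∈ sizes ∧ v = u + s ∧ v ≤ max

theorem pvChar_self {max : Int} {sizes : List Int} (hpos : ∀ s ∈ sizes, 0 < s) (j : Int) :
    (pvChar max sizes j j ↔ pvReach max sizes j) := by
  constructor
  · rintro (rfl | ⟨u, s, _, _, hu, hs, rfl, hle⟩)
    · exact pvReach.zero
    · exact pvReach.step hu hs hle
  · intro h
    cases h with
    | zero => exact Or.inl rfl
    | @step u s hu hs hle =>
      right
      refine ⟨u, s, ?_, ?_, hu, hs, rfl, hle⟩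
      · rcases pvReach_bound hpos hu with rfl | ⟨h1, _⟩ <;> omega
      · have := hpos s hs; omega

theorem pvChar_succ {max : Int} {sizes : List Int} (j v : Int) :
    pvChar max sizes (j + 1) v ↔
      pvChar max sizes j v ∨
        (pvReach max sizes j ∧ 0 ≤ j ∧ ∃ s ∈ sizes, v = j + s ∧ v ≤ max) := by
  constructor
  · rintro (rfl | ⟨u, s, hu0, huj, hu, hs, rfl, hle⟩)
    · exact Or.inl (Or.inl rfl)
    · rcases lt_or_ge u j with hlt | hge
      · exact Or.inl (Or.inr ⟨u, s, hu0, hlt, hu, hs, rfl, hle⟩)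
      · have : u = j := by omega
        subst this
        exact Or.inr ⟨hu, hu0, s, hs, rfl, hle⟩
  · rintro ((rfl | ⟨u, s, hu0, huj, hu, hs, rfl, hle⟩) | ⟨hj, hj0, s, hs, rfl, hle⟩)
    · exact Or.inl rfl
    · exact Or.inr ⟨u, s, hu0, by omega, hu, hs, rfl, hle⟩
    · exact Or.inr ⟨j, s, hj0, by omega, hj, hs, rfl, hle⟩

theorem pvChar_top {max : Int} {sizes : List Int} (hpos : ∀ s ∈ sizes, 0 < s)
    (v : Int) (hv : v ≤ max) :
    (pvChar max sizes (max + 1) v ↔ pvReach max sizes v) := by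
  constructor
  · rintro (rfl | ⟨u, s, _, _, hu, hs, rfl, hle⟩)
    · exact pvReach.zero
    · exact pvReach.step hu hs hle
  · intro h
    cases h with
    | zero => exact Or.inl rfl
    | @step u s hu hs hle =>
      right
      have hspos := hpos s hs
      refine ⟨u, s, ?_, by omega, hu, hs, rfl, hle⟩
      rcases pvReach_bound hpos hu with rfl | ⟨h1, _⟩ <;> omega

-- the inner fold of B: table update characterisation
theorem pvFoldB (max i : Int) (l : List Int) (T : List Bool)
    (hi : 0 ≤ i) (hpos : ∀ s ∈ l, 0 < s) (hT : T.length = (max + 1).toNat) :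
    ((l.foldl (pvStepUpd max i) T).length = (max + 1).toNat) ∧
    ∀ v : Int, 0 ≤ v → v ≤ max →
      (PySem.List.pyGetD (l.foldl (pvStepUpd max i) T) v false = true ↔
        PySem.List.pyGetD T v false = true ∨ ∃ s ∈ l, v = i + s ∧ i + s ≤ max) := by
  induction l generalizing T with
  | nil => exact ⟨hT, by simp⟩
  | cons s0 l ih =>
    have hpos' : ∀ s ∈ l, 0 < s := fun s hs => hpos s (List.mem_cons_of_mem _ hs)
    by_cases hle : i + s0 ≤ max
    · have h0 : 0 ≤ i + s0 := by have := hpos s0 List.mem_cons_self; omega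
      have hcast : i + s0 = ((i + s0).toNat : Int) := (Int.toNat_of_nonneg h0).symm
      have hlt : (i + s0).toNat < T.length := by rw [hT]; omega
      have hstep : pvStepUpd max i T s0 = PySem.List.pySetD T (i + s0) true := by
        simp [pvStepUpd, hle]
      have hlen' : (PySem.List.pySetD T (i + s0) true).length = (max + 1).toNat := by
        rw [PySem.List.length_pySetD, hT]
      obtain ⟨ihlen, ihchar⟩ := ih _ hpos' hlen'
      refine ⟨by rw [List.foldl_cons, hstep]; exact ihlen, ?_⟩
      intro v hv0 hvmax
      rw [List.foldl_cons, hstep, ihchar v hv0 hvmax]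
      have hvcast : v = ((v.toNat : Nat) : Int) := (Int.toNat_of_nonneg hv0).symm
      have hget : PySem.List.pyGetD (PySem.List.pySetD T (i + s0) true) v false
          = if v.toNat = (i + s0).toNat then true else PySem.List.pyGetD T v false := by
        rw [hcast, hvcast]
        exact PySem.List.pyGetD_pySetD_natCast _ _ _ _ _ hlt
      rw [hget]
      constructor
      · rintro (h | ⟨s, hs, rfl, hsle⟩)
        · split_ifs at h with hv
          · exact Or.inr ⟨s0, List.mem_cons_self, by omega, hle⟩
          · exact Or.inl h
        · exact Or.inr ⟨s, List.mem_cons_of_mem _ hs, rfl, hsle⟩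
      · rintro (h | ⟨s, hs, rfl, hsle⟩)
        · left
          split_ifs with hv
          · rfl
          · exact h
        · rcases List.mem_cons.1 hs with rfl | hs
          · left
            rw [if_pos (by omega)]
          · exact Or.inr ⟨s, hs, rfl, hsle⟩
    · have hstep : pvStepUpd max i T s0 = T := by simp [pvStepUpd, hle]
      obtain ⟨ihlen, ihchar⟩ := ih T hpos' hT
      refine ⟨by rw [List.foldl_cons, hstep]; exact ihlen, ?_⟩
      intro v hv0 hvmax
      rw [List.foldl_cons, hstep, ihchar v hv0 hvmax]
      constructor
      · rintro (h | ⟨s, hs, rfl, hsle⟩)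
        · exact Or.inl h
        · exact Or.inr ⟨s, List.mem_cons_of_mem _ hs, rfl, hsle⟩
      · rintro (h | ⟨s, hs, rfl, hsle⟩)
        · exact Or.inl h
        · rcases List.mem_cons.1 hs with rfl | hs
          · exact absurd hsle hle
          · exact Or.inr ⟨s, hs, rfl, hsle⟩

-- the outer loop of B maintains pvChar
theorem pvLoopB (max : Int) (sizes : List Int) (hmax : 0 ≤ max) (hpos : ∀ s ∈ sizes, 0 < s) :
    ∀ j : Nat, (j : Int) ≤ max + 1 →
      (((PySem.List.pyRange 0 j 1).foldl (pvStepB max sizes)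
          (PySem.List.pySetD (List.replicate (max + 1).toNat false) 0 true)).length = (max + 1).toNat) ∧
      ∀ v : Int, 0 ≤ v → v ≤ max →
        (PySem.List.pyGetD ((PySem.List.pyRange 0 j 1).foldl (pvStepB max sizes)
            (PySem.List.pySetD (List.replicate (max + 1).toNat false) 0 true)) v false = true ↔
          pvChar max sizes j v) := by
  have hL : 0 < (max + 1).toNat := by omega
  have hbase : ∀ v : Int, 0 ≤ v →
      (PySem.List.pyGetD (PySem.List.pySetD (List.replicate (max + 1).toNat false) 0 true) v false
        = true ↔ v = 0) := by
    intro v hv0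
    have hlt : (0 : Nat) < (List.replicate (max + 1).toNat (false : Bool)).length := by
      simpa using hL
    have hvcast : v = ((v.toNat : Nat) : Int) := (Int.toNat_of_nonneg hv0).symm
    have hget : PySem.List.pyGetD
        (PySem.List.pySetD (List.replicate (max + 1).toNat false) ((0 : Nat) : Int) true)
          ((v.toNat : Nat) : Int) false
        = if v.toNat = (0 : Nat) then true else
            PySem.List.pyGetD (List.replicate (max + 1).toNat false) ((v.toNat : Nat) : Int) false :=
      PySem.List.pyGetD_pySetD_natCast _ _ _ _ _ hlt
    rw [show (0 : Int) = ((0 : Nat) : Int) from rfl, hvcast, hget]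
    have hrep : PySem.List.pyGetD (List.replicate (max + 1).toNat (false : Bool))
        ((v.toNat : Nat) : Int) false = false := by
      rw [PySem.List.pyGetD_natCast]
      simp only [List.getD, List.getElem?_replicate]
      split_ifs <;> rfl
    rw [hrep]
    constructor
    · intro h
      by_cases hv : v.toNat = 0
      · omega
      · rw [if_neg hv] at h
        exact absurd h (by simp)
    · intro h
      rw [if_pos (by omega)]
  intro j
  induction j with
  | zero =>
    intro _
    have hr : PySem.List.pyRange 0 ((0 : Nat) : Int) 1 = [] :=
      PySem.List.pyRange_one_eq_nil (by simp)
    rw [hr]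
    simp only [List.foldl_nil]
    refine ⟨by rw [PySem.List.length_pySetD]; simp, ?_⟩
    intro v hv0 hvmax
    rw [hbase v hv0]
    constructor
    · exact fun h => Or.inl h
    · rintro (rfl | ⟨u, s, hu0, huj, _, _, _, _⟩)
      · rfl
      · omega
  | succ j ih =>
    intro hj1
    have hj : (j : Int) ≤ max := by push_cast at hj1 ⊢; omega
    obtain ⟨ihlen, ihchar⟩ := ih (by omega)
    have hr : PySem.List.pyRange 0 (((j + 1 : Nat)) : Int) 1
        = PySem.List.pyRange 0 (j : Int) 1 ++ [(j : Int)] := by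
      rw [show (((j + 1 : Nat)) : Int) = (j : Int) + 1 by push_cast; ring]
      exact PySem.List.pyRange_one_succ_right (by positivity)
    rw [hr, List.foldl_append]
    set T := (PySem.List.pyRange 0 (j : Int) 1).foldl (pvStepB max sizes)
      (PySem.List.pySetD (List.replicate (max + 1).toNat false) 0 true) with hT
    simp only [List.foldl_cons, List.foldl_nil]
    by_cases hjget : PySem.List.pyGetD T (j : Int) false = true
    · have hreachj : pvReach max sizes (j : Int) :=
        (pvChar_self hpos (j : Int)).1 ((ihchar (j : Int) (by positivity) hj).1 hjget)
      have hstep : pvStepB max sizes T (j : Int) = sizes.foldl (pvStepUpd max (j : Int)) T := by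
        simp [pvStepB, hjget]
      rw [hstep]
      obtain ⟨flen, fchar⟩ := pvFoldB max (j : Int) sizes T (by positivity) hpos ihlen
      refine ⟨flen, ?_⟩
      intro v hv0 hvmax
      rw [fchar v hv0 hvmax,
        show (((j + 1 : Nat)) : Int) = (j : Int) + 1 by push_cast; ring,
        pvChar_succ, ihchar v hv0 hvmax]
      constructor
      · rintro (h | ⟨s, hs, rfl, hsle⟩)
        · exact Or.inl h
        · exact Or.inr ⟨hreachj, by positivity, s, hs, rfl, hsle⟩
      · rintro (h | ⟨_, _, s, hs, rfl, hsle⟩)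
        · exact Or.inl h
        · exact Or.inr ⟨s, hs, rfl, hsle⟩
    · have hnreach : ¬ pvReach max sizes (j : Int) := by
        intro h
        exact hjget ((ihchar (j : Int) (by positivity) hj).2 ((pvChar_self hpos (j : Int)).2 h))
      have hstep : pvStepB max sizes T (j : Int) = T := by
        simp [pvStepB, hjget]
      rw [hstep]
      refine ⟨ihlen, ?_⟩
      intro v hv0 hvmax
      rw [ihchar v hv0 hvmax,
        show (((j + 1 : Nat)) : Int) = (j : Int) + 1 by push_cast; ring,
        pvChar_succ]
      constructor
      · exact fun h => Or.inl h
      · rintro (h | ⟨h, _, _⟩)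
        · exact h
        · exact absurd h hnreach

-- B's output is the ascending list of pvReach members
theorem pvB_char (max : Int) (sizes : List Int) (hne : sizes.filter (fun s => decide (0 < s)) ≠ []) :
    (generate_axis_positions_2d_py_alt max sizes).Nodup ∧
    (generate_axis_positions_2d_py_alt max sizes).Pairwise (· < ·) ∧
    ∀ v, v ∈ generate_axis_positions_2d_py_alt max sizes ↔
      pvReach max (sizes.filter (fun s => decide (0 < s))) v := by
  set sz := sizes.filter (fun s => decide (0 < s)) with hsz
  have hpos : ∀ s ∈ sz, 0 < s := by
    intro s hs
    rw [hsz, List.mem_filter] at hs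
    exact of_decide_eq_true hs.2
  by_cases hmax : max < 0
  · have halt : generate_axis_positions_2d_py_alt max sizes = [0] := by
      unfold generate_axis_positions_2d_py_alt
      rw [if_neg hne, if_pos hmax]
    rw [halt]
    refine ⟨List.nodup_singleton _, List.pairwise_singleton _ _, ?_⟩
    intro v
    rw [List.mem_singleton]
    constructor
    · rintro rfl; exact pvReach.zero
    · intro h
      rcases pvReach_bound hpos h with rfl | ⟨h1, h2⟩
      · rfl
      · omega
  · push_neg at hmax
    have halt : generate_axis_positions_2d_py_alt max sizes
        = (PySem.List.pyRange 0 (max + 1) 1).filter (fun i =>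
            PySem.List.pyGetD ((PySem.List.pyRange 0 (max + 1) 1).foldl (pvStepB max sz)
              (PySem.List.pySetD (List.replicate (max + 1).toNat false) 0 true)) i false) := by
      unfold generate_axis_positions_2d_py_alt
      rw [if_neg hne, if_neg (by omega)]
    have hcast : ((((max + 1).toNat : Nat)) : Int) = max + 1 := by omega
    obtain ⟨_, hchar⟩ := pvLoopB max sz hmax hpos (max + 1).toNat (by omega)
    rw [hcast] at hchar
    rw [halt]
    refine ⟨List.Nodup.filter _ (PySem.List.nodup_pyRange_one 0 (max + 1)),
      List.Pairwise.filter _ (PySem.List.pairwise_lt_pyRange_one 0 (max + 1)), ?_⟩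
    intro v
    rw [List.mem_filter, PySem.List.mem_pyRange_one]
    constructor
    · rintro ⟨⟨hv0, hvlt⟩, hget⟩
      exact (pvChar_top hpos v (by omega)).1 ((hchar v hv0 (by omega)).1 hget)
    · intro h
      have hb := pvReach_bound hpos h
      have hv0 : 0 ≤ v := by rcases hb with rfl | ⟨h1, _⟩ <;> omega
      have hvmax : v ≤ max := by rcases hb with rfl | ⟨_, h2⟩ <;> omega
      refine ⟨⟨hv0, by omega⟩, ?_⟩
      exact (hchar v hv0 hvmax).2 ((pvChar_top hpos v hvmax).2 h)

-- ===== VERDICT (by name: the statement is the Claim_ definition above) =====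
theorem generate_axis_positions_2d_py_spec : Claim_equal_generate_axis_positions_2d_py := by
  intro max sizes _
  unfold Spec_generate_axis_positions_2d_py
  by_cases hne : sizes.filter (fun s => decide (0 < s)) = []
  · unfold generate_axis_positions_2d_py generate_axis_positions_2d_py_alt
    simp [hne]
  · obtain ⟨F, hA, hFnd, hFmem⟩ := pvA_char max sizes hne
    obtain ⟨hBnd, hBpw, hBmem⟩ := pvB_char max sizes hne
    rw [hA]
    apply PySem.List.sorted_eq_of_perm_of_pairwise_lt
    · exact (List.perm_ext_iff_of_nodup hBnd hFnd).2 (fun v => (hBmem v).trans (hFmem v).symm)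
    · simpa using hBpw
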